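-- pv_equiv track=rewrite | github.com/sunilviyer/suniliyer | OLD/v1-complete/get_all_slugs.py | categorize_slugs
-- ===== SOURCE A (Python) =====
-- def categorize_slugs(all_slugs, processed_slugs):
--     """Categorize slugs by processing status and type"""
--     remaining = [slug for slug in all_slugs if slug not in processed_slugs]
--
--     # Categorize by prefix/type
--     categories = {
--         'numbered_articles': [],
--         'named_articles': [],
--         'how_to_guides': [],
--         'other': []
--     }
--
--     for slug in remaining:
--         if slug.startswith('article-') and any(char.isdigit() for char in slug[:15]):
--             categories['numbered_articles'].append(slug)
--         elif slug.startswith('article-') and 'how-to' in slug: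
--             categories['how_to_guides'].append(slug)
--         elif slug.startswith('article-'):
--             categories['named_articles'].append(slug)
--         else:
--             categories['other'].append(slug)
--
--     return categories, remaining
-- ===== SOURCE B (Python) =====
-- def categorize_slugs(all_slugs, processed_slugs):
--     """Categorize slugs by processing status and type (filtered-passes decomposition)."""
--     done = set(processed_slugs)
--     remaining = [s for s in all_slugs if s not in done]
--
--     def is_article(s):
--         return s.startswith('article-')
--
--     def is_numbered(s):
--         return is_article(s) and any(c.isdigit() for c in s[:15])
--
--     def is_howto(s):
--         return is_article(s) and not is_numbered(s) and 'how-to' in s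
--
--     def is_named(s):
--         return is_article(s) and not is_numbered(s) and 'how-to' not in s
--
--     categories = {
--         'numbered_articles': [s for s in remaining if is_numbered(s)],
--         'named_articles': [s for s in remaining if is_named(s)],
--         'how_to_guides': [s for s in remaining if is_howto(s)],
--         'other': [s for s in remaining if not is_article(s)],
--     }
--     return categories, remaining
-- ===== Notes on version B (the rewrite author's own statement) =====
-- stated objective: faster
-- what changed: B replaces A's single classification loop with a per-bucket decomposition (four independent filtered passes with explicit predicates) and uses a set for the processed-slug membership test instead of A's linear list scan.
import Mathlib
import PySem

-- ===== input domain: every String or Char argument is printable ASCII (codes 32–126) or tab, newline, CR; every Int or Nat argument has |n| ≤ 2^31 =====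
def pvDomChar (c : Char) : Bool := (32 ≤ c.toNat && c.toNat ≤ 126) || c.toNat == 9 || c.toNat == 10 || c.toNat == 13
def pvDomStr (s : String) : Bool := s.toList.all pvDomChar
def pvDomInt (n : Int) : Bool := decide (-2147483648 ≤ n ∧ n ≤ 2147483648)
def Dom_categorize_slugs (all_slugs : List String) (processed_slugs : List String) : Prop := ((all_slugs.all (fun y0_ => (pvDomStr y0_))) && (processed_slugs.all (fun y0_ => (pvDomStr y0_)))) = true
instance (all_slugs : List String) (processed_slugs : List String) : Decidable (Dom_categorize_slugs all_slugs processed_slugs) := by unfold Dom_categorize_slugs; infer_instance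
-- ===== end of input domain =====

-- B re-decomposes A's single classification loop into four independent filtered passes
-- with explicit predicates, and tests processed membership against a set.

-- ===== PORT A =====
def categorize_slugs (all_slugs : List String) (processed_slugs : List String) : (List (String × List String)) × List String :=
  let remaining := all_slugs.filter (fun slug => !processed_slugs.contains slug)
  let cats := remaining.foldl
    (fun (c : List String × List String × List String × List String) slug =>
      if PySem.Str.startswith slug "article-"
          && (PySem.Str.slice slug none (some 15)).toList.any PySem.Chars.isdigit then
        (c.1 ++ [slug], c.2.1, c.2.2.1, c.2.2.2)
      else if PySem.Str.startswith slug "article-" && PySem.Str.isIn "how-to" slug then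
        (c.1, c.2.1, c.2.2.1 ++ [slug], c.2.2.2)
      else if PySem.Str.startswith slug "article-" then
        (c.1, c.2.1 ++ [slug], c.2.2.1, c.2.2.2)
      else
        (c.1, c.2.1, c.2.2.1, c.2.2.2 ++ [slug]))
    ([], [], [], [])
  ([("numbered_articles", cats.1), ("named_articles", cats.2.1),
    ("how_to_guides", cats.2.2.1), ("other", cats.2.2.2)], remaining)

-- ===== PORT B =====
def pvIsArticle (s : String) : Bool := PySem.Str.startswith s "article-"
def pvIsNumbered (s : String) : Bool :=
  pvIsArticle s && (PySem.Str.slice s none (some 15)).toList.any PySem.Chars.isdigit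
def pvIsHowto (s : String) : Bool := pvIsArticle s && !pvIsNumbered s && PySem.Str.isIn "how-to" s
def pvIsNamed (s : String) : Bool := pvIsArticle s && !pvIsNumbered s && !PySem.Str.isIn "how-to" s

def categorize_slugs_alt (all_slugs : List String) (processed_slugs : List String) : (List (String × List String)) × List String :=
  let done := PySem.Set.ofList processed_slugs
  let remaining := all_slugs.filter (fun s => !PySem.Set.contains done s)
  ([("numbered_articles", remaining.filter pvIsNumbered),
    ("named_articles", remaining.filter pvIsNamed),
    ("how_to_guides", remaining.filter pvIsHowto),
    ("other", remaining.filter (fun s => !pvIsArticle s))], remaining)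

-- ===== PRECONDITION & SPEC =====
def Spec_categorize_slugs (all_slugs : List String) (processed_slugs : List String) (out : (List (String × List String)) × List String) : Prop := out = categorize_slugs_alt all_slugs processed_slugs
instance (all_slugs : List String) (processed_slugs : List String) (out : (List (String × List String)) × List String) : Decidable (Spec_categorize_slugs all_slugs processed_slugs out) := by unfold Spec_categorize_slugs; infer_instance

-- ===== CLAIM (what is proved, stated in full; the proofs are below) =====
def Claim_equal_categorize_slugs : Prop := ∀ (all_slugs : List String) (processed_slugs : List String), Dom_categorize_slugs all_slugs processed_slugs → Spec_categorize_slugs all_slugs processed_slugs (categorize_slugs all_slugs processed_slugs)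

-- ===== LEMMAS AND PROOFS =====

-- the `remaining` lists coincide: set-of-list membership is list membership
theorem pv_remaining_eq (all_slugs processed_slugs : List String) :
    all_slugs.filter (fun s => !PySem.Set.contains (PySem.Set.ofList processed_slugs) s)
      = all_slugs.filter (fun slug => !processed_slugs.contains slug) := by
  apply List.filter_congr
  intro s _
  simp [PySem.Set.contains_iff, PySem.Set.mem_ofList, List.contains_iff_mem]

-- A's loop, from an arbitrary accumulator, produces the four filtered passes
theorem pv_loop_eq (l : List String) (a b c d : List String) :
    l.foldl
      (fun (acc : List String × List String × List String × List String) slug =>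
        if PySem.Str.startswith slug "article-"
            && (PySem.Str.slice slug none (some 15)).toList.any PySem.Chars.isdigit then
          (acc.1 ++ [slug], acc.2.1, acc.2.2.1, acc.2.2.2)
        else if PySem.Str.startswith slug "article-" && PySem.Str.isIn "how-to" slug then
          (acc.1, acc.2.1, acc.2.2.1 ++ [slug], acc.2.2.2)
        else if PySem.Str.startswith slug "article-" then
          (acc.1, acc.2.1 ++ [slug], acc.2.2.1, acc.2.2.2)
        else
          (acc.1, acc.2.1, acc.2.2.1, acc.2.2.2 ++ [slug])) (a, b, c, d)
      = (a ++ l.filter pvIsNumbered, b ++ l.filter pvIsNamed,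
         c ++ l.filter pvIsHowto, d ++ l.filter (fun s => !pvIsArticle s)) := by
  induction l generalizing a b c d with
  | nil => simp
  | cons x xs ih =>
    have eN : pvIsNumbered x
        = (PySem.Str.startswith x "article-"
            && (PySem.Str.slice x none (some 15)).toList.any PySem.Chars.isdigit) := by
      simp only [pvIsNumbered, pvIsArticle]
    cases hA : PySem.Str.startswith x "article-" <;>
      cases hD : (PySem.Str.slice x none (some 15)).toList.any PySem.Chars.isdigit <;>
        cases hH : PySem.Str.isIn "how-to" x <;>
          (simp only [hA, hD, hH, Bool.false_and, Bool.and_false, Bool.true_and,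
            Bool.and_true, Bool.not_true, Bool.not_false, Bool.false_eq_true,
            Bool.true_eq_false] at eN;
           simp only [List.foldl_cons, List.filter_cons, hA, hD, hH, eN,
             pvIsNamed, pvIsHowto, pvIsArticle, Bool.false_and, Bool.and_false,
             Bool.true_and, Bool.and_true, Bool.not_true, Bool.not_false,
             Bool.false_eq_true, Bool.true_eq_false, if_true, if_false,
             ite_true, ite_false, ih];
           simp [eN])

-- ===== VERDICT (by name: the statement is the Claim_ definition above) =====
theorem categorize_slugs_spec : Claim_equal_categorize_slugs := by
  intro all_slugs processed_slugs _
  unfold Spec_categorize_slugs categorize_slugs categorize_slugs_alt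
  simp only [pv_remaining_eq, pv_loop_eq, List.nil_append]
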